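-- pv_equiv track=rewrite | github.com/ckoons/BubbleSpacetimeTheory | play/toy_316_width_preservation.py | measure_refutation_depth
-- ===== SOURCE A (Python) =====
-- def bcp(clauses, assign):
--     """BCP returning (result, final_assignment).
--     result: 'conflict' or 'no_conflict'
--     """
--     assign = dict(assign)
--     changed = True
--     while changed:
--         changed = False
--         for clause in clauses:
--             unsat_count = 0
--             sat = False
--             last_unset = None
--             for lit in clause:
--                 var = abs(lit)
--                 if var in assign:
--                     val = assign[var]
--                     if (lit > 0 and val == 1) or (lit < 0 and val == 0):
--                         sat = True
--                         break
--                     else: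
--                         unsat_count += 1
--                 else:
--                     last_unset = lit
--             if sat:
--                 continue
--             if unsat_count == len(clause):
--                 return 'conflict', assign
--             if unsat_count == len(clause) - 1 and last_unset is not None:
--                 var = abs(last_unset)
--                 val = 1 if last_unset > 0 else 0
--                 if var in assign:
--                     if assign[var] != val:
--                         return 'conflict', assign
--                 else:
--                     assign[var] = val
--                     changed = True
--     return 'no_conflict', assign
--
-- def dpll_refute(clauses, init_assign, max_depth, all_vars):
--     """Run DPLL with depth limit. Returns True if contradiction found within depth limit."""
--
--     def recurse(assign, depth):
--         # BCP
--         result, assign = bcp(clauses, assign)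
--         if result == 'conflict':
--             return True
--
--         if depth >= max_depth:
--             return False
--
--         # Pick an unassigned variable (prefer original vars, then small index)
--         unset = [v for v in all_vars if v not in assign]
--         if not unset:
--             return False  # All assigned, no conflict = satisfiable under this assignment
--
--         branch_var = unset[0]
--
--         # Try both branches
--         for val in [0, 1]:
--             a = dict(assign)
--             a[branch_var] = val
--             if not recurse(a, depth + 1):
--                 return False  # One branch is satisfiable → no refutation
--
--         return True  # Both branches lead to conflict → refutation found
--
--     return recurse(dict(init_assign), 0)
--
-- def measure_refutation_depth(clauses, backbone, all_vars, max_depth=15):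
--     """For each backbone var, find minimum DPLL depth to derive contradiction."""
--     depths = {}
--     for var, val in backbone.items():
--         wrong_val = 1 - val
--         init = {var: wrong_val}
--
--         found_depth = None
--         for d in range(max_depth + 1):
--             if dpll_refute(clauses, init, d, all_vars):
--                 found_depth = d
--                 break
--
--         depths[var] = found_depth if found_depth is not None else max_depth + 1
--     return depths
-- ===== SOURCE B (Python) =====
-- def bcp(clauses, assign):
--     """BCP returning (result, final_assignment).
--     result: 'conflict' or 'no_conflict'
--     """
--     assign = dict(assign)
--     changed = True
--     while changed:
--         changed = False
--         for clause in clauses: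
--             unsat_count = 0
--             sat = False
--             last_unset = None
--             for lit in clause:
--                 var = abs(lit)
--                 if var in assign:
--                     val = assign[var]
--                     if (lit > 0 and val == 1) or (lit < 0 and val == 0):
--                         sat = True
--                         break
--                     else:
--                         unsat_count += 1
--                 else:
--                     last_unset = lit
--             if sat:
--                 continue
--             if unsat_count == len(clause):
--                 return 'conflict', assign
--             if unsat_count == len(clause) - 1 and last_unset is not None:
--                 var = abs(last_unset)
--                 val = 1 if last_unset > 0 else 0
--                 if var in assign:
--                     if assign[var] != val:
--                         return 'conflict', assign
--                 else:
--                     assign[var] = val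
--                     changed = True
--     return 'no_conflict', assign
--
-- def _refutation_depth(clauses, assign, all_vars, cap):
--     """Exact minimal DPLL refutation depth of `assign`, computed in ONE search;
--     returns None when it exceeds `cap` (branch-and-bound cutoff)."""
--     result, assign = bcp(clauses, assign)
--     if result == 'conflict':
--         return 0
--     if cap <= 0:
--         return None
--     unset = [v for v in all_vars if v not in assign]
--     if not unset:
--         return None
--     v = unset[0]
--     best = 0
--     for val in (0, 1):
--         a = dict(assign)
--         a[v] = val
--         d = _refutation_depth(clauses, a, all_vars, cap - 1)
--         if d is None:
--             return None
--         if d > best: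
--             best = d
--     return best + 1
--
-- def measure_refutation_depth(clauses, backbone, all_vars, max_depth=15):
--     """Single bounded DPLL search per backbone var instead of iterative deepening."""
--     depths = {}
--     for var, val in backbone.items():
--         d = _refutation_depth(clauses, {var: 1 - val}, all_vars, max_depth)
--         depths[var] = d if d is not None and d <= max_depth else max_depth + 1
--     return depths
-- ===== Notes on version B (the rewrite author's own statement) =====
-- stated objective: faster
-- what changed: Replaces A's iterative deepening (re-running the depth-limited DPLL search for every limit 0..max_depth) with a single branch-and-bound DPLL search per backbone variable that computes the exact minimal refutation depth directly.
import Mathlib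
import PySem

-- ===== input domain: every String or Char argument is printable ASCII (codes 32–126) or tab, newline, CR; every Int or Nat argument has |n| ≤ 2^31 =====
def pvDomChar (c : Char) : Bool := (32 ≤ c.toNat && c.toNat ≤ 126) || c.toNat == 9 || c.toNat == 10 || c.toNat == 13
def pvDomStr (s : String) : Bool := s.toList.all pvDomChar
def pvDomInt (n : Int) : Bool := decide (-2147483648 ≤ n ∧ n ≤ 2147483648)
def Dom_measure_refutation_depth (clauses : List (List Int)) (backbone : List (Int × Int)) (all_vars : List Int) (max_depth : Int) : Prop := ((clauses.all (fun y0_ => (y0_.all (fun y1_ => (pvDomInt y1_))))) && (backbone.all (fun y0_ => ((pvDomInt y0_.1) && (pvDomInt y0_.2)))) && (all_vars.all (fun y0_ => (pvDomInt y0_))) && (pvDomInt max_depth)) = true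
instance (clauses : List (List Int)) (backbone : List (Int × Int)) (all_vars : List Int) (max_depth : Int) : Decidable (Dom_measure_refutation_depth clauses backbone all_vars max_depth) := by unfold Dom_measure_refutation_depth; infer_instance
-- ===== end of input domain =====

-- B replaces A's iterative-deepening loop (re-running depth-limited DPLL for every limit 0..max_depth)
-- by ONE branch-and-bound DPLL search that computes the exact minimal refutation depth directly.

-- ===== PORT A =====
-- shared helper: one scan of a clause; returns (sat, unsat_count, last_unset) as in bcp's inner for-loop
def pvScan (assign : PySem.Dict Int Int) : List Int → Bool × Int × Option Int
  | [] => (false, 0, none)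
  | lit :: rest =>
    match assign.get? |lit| with
    | some val =>
      if (lit > 0 ∧ val = 1) ∨ (lit < 0 ∧ val = 0) then (true, 0, none)  -- break (sat); rest of tuple unused
      else
        let r := pvScan assign rest
        (r.1, r.2.1 + 1, r.2.2)
    | none =>
      let r := pvScan assign rest
      (r.1, r.2.1, (r.2.2).orElse (fun _ => some lit))  -- last_unset = LAST unset literal

-- one pass of bcp's while-body over the clause list: (conflict?, assign, changed)
def pvPass (clauses : List (List Int)) (assign : PySem.Dict Int Int) (changed : Bool) :
    Bool × PySem.Dict Int Int × Bool :=
  match clauses with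
  | [] => (false, assign, changed)
  | clause :: rest =>
    let s := pvScan assign clause
    if s.1 then pvPass rest assign changed
    else if s.2.1 = PySem.List.len clause then (true, assign, changed)
    else if s.2.1 = PySem.List.len clause - 1 then
      match s.2.2 with
      | some lu =>
        let var : Int := |lu|
        let val : Int := if lu > 0 then 1 else 0
        match assign.get? var with
        | some v => if v ≠ val then (true, assign, changed) else pvPass rest assign changed
        | none => pvPass rest (assign.insert var val) true
      | none => pvPass rest assign changed
    else pvPass rest assign changed

-- the while-changed loop; fuel = one more than the number of literals bounds the passes
-- (each pass that sets changed assigns a previously-unassigned variable of the clauses)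
def pvBcpLoop (clauses : List (List Int)) : Nat → PySem.Dict Int Int → String × PySem.Dict Int Int
  | 0, assign => ("no_conflict", assign)  -- unreachable with the fuel below
  | fuel + 1, assign =>
    let p := pvPass clauses assign false
    if p.1 then ("conflict", p.2.1)
    else if p.2.2 then pvBcpLoop clauses fuel p.2.1
    else ("no_conflict", p.2.1)

def pvBcp (clauses : List (List Int)) (assign : PySem.Dict Int Int) : String × PySem.Dict Int Int :=
  pvBcpLoop clauses (clauses.flatten.length + 1) assign

-- dpll_refute's inner `recurse`
def pvRecurse (clauses : List (List Int)) (all_vars : List Int) (max_depth : Int)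
    (assign : PySem.Dict Int Int) (depth : Int) : Bool :=
  let p := pvBcp clauses assign
  if p.1 = "conflict" then true
  else if depth ≥ max_depth then false
  else
    match all_vars.filter (fun v => ! p.2.contains v) with
    | [] => false
    | bv :: _ =>
      pvRecurse clauses all_vars max_depth (p.2.insert bv 0) (depth + 1) &&
      pvRecurse clauses all_vars max_depth (p.2.insert bv 1) (depth + 1)
termination_by (max_depth - depth).toNat
decreasing_by all_goals omega

-- the `for d in range(max_depth+1): if dpll_refute(...): found_depth = d; break` loop,
-- ported as counting recursion so the (possibly huge) range is never materialized (Python's range is lazy)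
def pvFindDepth (clauses : List (List Int)) (all_vars : List Int) (init : PySem.Dict Int Int)
    (d stop : Int) : Option Int :=
  if d ≥ stop then none
  else if pvRecurse clauses all_vars d init 0 then some d
  else pvFindDepth clauses all_vars init (d + 1) stop
termination_by (stop - d).toNat
decreasing_by all_goals omega

def measure_refutation_depth (clauses : List (List Int)) (backbone : List (Int × Int)) (all_vars : List Int) (max_depth : Int) : List (Int × Int) :=
  (backbone.foldl (fun depths p =>
    let init := PySem.Dict.ofList [(p.1, 1 - p.2)]
    let found := pvFindDepth clauses all_vars init 0 (max_depth + 1)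
    depths.insert p.1 (found.getD (max_depth + 1))) PySem.Dict.empty).items

-- ===== PORT B =====
-- _refutation_depth: exact minimal refutation depth in one search, none once it exceeds cap
def pvRD (clauses : List (List Int)) (all_vars : List Int)
    (assign : PySem.Dict Int Int) (cap : Int) : Option Int :=
  let p := pvBcp clauses assign
  if p.1 = "conflict" then some 0
  else if cap ≤ 0 then none
  else
    match all_vars.filter (fun v => ! p.2.contains v) with
    | [] => none
    | bv :: _ =>
      match pvRD clauses all_vars (p.2.insert bv 0) (cap - 1) with
      | none => none
      | some d0 =>
        match pvRD clauses all_vars (p.2.insert bv 1) (cap - 1) with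
        | none => none
        | some d1 => some (max (max 0 d0) d1 + 1)
termination_by cap.toNat
decreasing_by all_goals omega

def measure_refutation_depth_alt (clauses : List (List Int)) (backbone : List (Int × Int)) (all_vars : List Int) (max_depth : Int) : List (Int × Int) :=
  (backbone.foldl (fun depths p =>
    let d := pvRD clauses all_vars (PySem.Dict.ofList [(p.1, 1 - p.2)]) max_depth
    depths.insert p.1 (match d with
      | some k => if k ≤ max_depth then k else max_depth + 1
      | none => max_depth + 1)) PySem.Dict.empty).items

-- ===== PRECONDITION & SPEC =====
def Spec_measure_refutation_depth (clauses : List (List Int)) (backbone : List (Int × Int)) (all_vars : List Int) (max_depth : Int) (out : List (Int × Int)) : Prop := out = measure_refutation_depth_alt clauses backbone all_vars max_depth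
instance (clauses : List (List Int)) (backbone : List (Int × Int)) (all_vars : List Int) (max_depth : Int) (out : List (Int × Int)) : Decidable (Spec_measure_refutation_depth clauses backbone all_vars max_depth out) := by unfold Spec_measure_refutation_depth; infer_instance

-- ===== CLAIM (what is proved, stated in full; the proofs are below) =====
def Claim_equal_measure_refutation_depth : Prop := ∀ (clauses : List (List Int)) (backbone : List (Int × Int)) (all_vars : List Int) (max_depth : Int), Dom_measure_refutation_depth clauses backbone all_vars max_depth → Spec_measure_refutation_depth clauses backbone all_vars max_depth (measure_refutation_depth clauses backbone all_vars max_depth)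

-- ===== LEMMAS AND PROOFS =====

theorem pvRD_bounds (clauses : List (List Int)) (all_vars : List Int)
    (assign : PySem.Dict Int Int) (cap : Int) (k : Int)
    (h : pvRD clauses all_vars assign cap = some k) : 0 ≤ k ∧ k ≤ max cap 0 := by
  fun_induction pvRD clauses all_vars assign cap generalizing k
  all_goals try simp only [List.unattach_filter, List.unattach_attach] at *
  all_goals try simp_all
  all_goals try (simp only [Int.max_def] at *; split_ifs at * <;> omega)
theorem pvRD_stable (clauses : List (List Int)) (all_vars : List Int)
    (assign : PySem.Dict Int Int) (cap : Int) (k : Int)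
    (h : pvRD clauses all_vars assign cap = some k) :
    ∀ cap', k ≤ cap' → pvRD clauses all_vars assign cap' = some k := by
  fun_induction pvRD clauses all_vars assign cap generalizing k with
  | case1 =>
    rename_i A C P hcon
    intro cap' hk'
    simp only [P] at *
    simp only [Option.some.injEq] at h
    subst h
    rw [pvRD.eq_def]
    simp only [hcon, if_true]
  | case6 =>
    rename_i A C P hnc hpos bv rest hfil d0 hd0 d1 hd1 ih0 ih1
    intro cap' hk'
    simp only [P] at *
    simp only [List.unattach_filter, List.unattach_attach] at hfil
    simp only [hfil, hd0, hd1, Option.some.injEq] at h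
    subst h
    have b0 := pvRD_bounds clauses all_vars ((pvBcp clauses A).2.insert bv 0) (C - 1) d0 hd0
    have b1 := pvRD_bounds clauses all_vars ((pvBcp clauses A).2.insert bv 1) (C - 1) d1 hd1
    have m2 := le_max_right 0 d0
    have m1 := le_max_left (max 0 d0) d1
    have m3 := le_max_right (max 0 d0) d1
    have hd0' := ih0 d0 hd0 (cap' - 1) (by omega)
    have hd1' := ih1 d1 hd1 (cap' - 1) (by omega)
    rw [pvRD.eq_def]
    simp only [if_neg hnc, if_neg (show ¬ cap' ≤ 0 by omega), hfil, hd0', hd1']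
  | _ =>
    intro cap' hk'
    exfalso
    try simp only [List.unattach_filter, List.unattach_attach] at *
    simp_all
theorem pvRecurse_eq_isSome (clauses : List (List Int)) (all_vars : List Int)
    (max_depth : Int) (assign : PySem.Dict Int Int) (depth : Int) :
    pvRecurse clauses all_vars max_depth assign depth
      = (pvRD clauses all_vars assign (max_depth - depth)).isSome := by
  fun_induction pvRecurse clauses all_vars max_depth assign depth with
  | case1 =>
    rename_i A D P hcon
    simp only [P] at *
    rw [pvRD.eq_def]
    simp only [hcon, if_true, Option.isSome_some]
  | case2 =>
    rename_i A D P hnc hge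
    simp only [P] at *
    rw [pvRD.eq_def]
    simp only [if_neg hnc, if_pos (show max_depth - D ≤ 0 by omega), Option.isSome_none]
  | case3 =>
    rename_i A D P hnc hlt hfil
    simp only [P] at *
    simp only [List.unattach_filter, List.unattach_attach] at hfil
    rw [pvRD.eq_def]
    simp only [if_neg hnc, if_neg (show ¬ max_depth - D ≤ 0 by omega), hfil, Option.isSome_none]
  | case4 =>
    rename_i A D P hnc hlt bv rest hfil ih0 ih1
    simp only [P] at *
    simp only [List.unattach_filter, List.unattach_attach] at hfil
    have e : max_depth - (D + 1) = max_depth - D - 1 := by ring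
    rw [e] at ih0 ih1
    rw [pvRD.eq_def]
    simp only [if_neg hnc, if_neg (show ¬ max_depth - D ≤ 0 by omega), hfil]
    rw [ih0, ih1]
    cases pvRD clauses all_vars ((pvBcp clauses A).2.insert bv 0) (max_depth - D - 1) with
    | none => simp
    | some d0 =>
      cases pvRD clauses all_vars ((pvBcp clauses A).2.insert bv 1) (max_depth - D - 1) <;> simp
theorem pvFindDepth_none (clauses : List (List Int)) (all_vars : List Int)
    (init : PySem.Dict Int Int) (stop : Int) :
    ∀ n : Nat, ∀ a : Int, (stop - a).toNat = n →
      (∀ d, a ≤ d → d < stop → pvRecurse clauses all_vars d init 0 = false) →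
      pvFindDepth clauses all_vars init a stop = none := by
  intro n
  induction n using Nat.strong_induction_on with
  | _ n ih =>
    intro a hn h
    rw [pvFindDepth]
    by_cases hge : a ≥ stop
    · rw [if_pos hge]
    · rw [if_neg hge, h a le_rfl (by omega), if_neg (by simp)]
      exact ih (stop - (a + 1)).toNat (by omega) (a + 1) rfl
        (fun d hd hd' => h d (by omega) hd')

-- if pvRD succeeds at budget md (md ≥ 0) with value k, the loop stops exactly at d = k
theorem pvFind_some (clauses : List (List Int)) (all_vars : List Int)
    (init : PySem.Dict Int Int) (md k : Int) (hmd : 0 ≤ md)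
    (hk : pvRD clauses all_vars init md = some k) :
    ∀ n : Nat, ∀ a : Int, 0 ≤ a → a ≤ k → (k - a).toNat = n →
      pvFindDepth clauses all_vars init a (md + 1) = some k := by
  have bk := pvRD_bounds clauses all_vars init md k hk
  have hkmd : k ≤ md := by omega
  intro n
  induction n using Nat.strong_induction_on with
  | _ n ih =>
    intro a ha hak hn
    rw [pvFindDepth]
    rw [if_neg (by omega)]
    by_cases hek : a = k
    · subst hek
      rw [pvRecurse_eq_isSome]
      have : pvRD clauses all_vars init (a - 0) = some a := by
        rw [show a - 0 = a by ring]
        exact pvRD_stable clauses all_vars init md a hk a le_rfl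
      rw [this]; simp
    · have hlt : a < k := by omega
      have hfalse : pvRecurse clauses all_vars a init 0 = false := by
        rw [pvRecurse_eq_isSome]
        cases hr : pvRD clauses all_vars init (a - 0) with
        | none => simp
        | some k' =>
          exfalso
          have b' := pvRD_bounds clauses all_vars init (a - 0) k' hr
          have : pvRD clauses all_vars init md = some k' :=
            pvRD_stable clauses all_vars init (a - 0) k' hr md (by omega)
          rw [hk] at this
          simp only [Option.some.injEq] at this
          omega
      rw [hfalse, if_neg (by simp)]
      exact ih (k - (a + 1)).toNat (by omega) (a + 1) (by omega) (by omega) rfl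

theorem pv_per_var (clauses : List (List Int)) (all_vars : List Int)
    (init : PySem.Dict Int Int) (md : Int) :
    (pvFindDepth clauses all_vars init 0 (md + 1)).getD (md + 1)
      = (match pvRD clauses all_vars init md with
          | some k => if k ≤ md then k else md + 1
          | none => md + 1) := by
  by_cases hmd : 0 ≤ md
  · cases hk : pvRD clauses all_vars init md with
    | some k =>
      have bk := pvRD_bounds clauses all_vars init md k hk
      rw [pvFind_some clauses all_vars init md k hmd hk (k - 0).toNat 0 le_rfl (by omega) rfl]
      simp only [Option.getD_some]
      rw [if_pos (by omega)]
    | none =>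
      rw [pvFindDepth_none clauses all_vars init (md + 1) (md + 1 - 0).toNat 0 rfl]
      · rfl
      · intro d hd hd'
        rw [pvRecurse_eq_isSome]
        cases hr : pvRD clauses all_vars init (d - 0) with
        | none => simp
        | some k' =>
          exfalso
          have b' := pvRD_bounds clauses all_vars init (d - 0) k' hr
          have := pvRD_stable clauses all_vars init (d - 0) k' hr md (by omega)
          rw [hk] at this
          simp at this
  · cases hk : pvRD clauses all_vars init md with
    | some k =>
      have bk := pvRD_bounds clauses all_vars init md k hk
      rw [pvFindDepth, if_pos (by omega)]
      show md + 1 = if k ≤ md then k else md + 1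
      rw [if_neg (by omega)]
    | none =>
      rw [pvFindDepth, if_pos (by omega)]
      rfl

theorem pv_fold_eq (clauses : List (List Int)) (all_vars : List Int) (max_depth : Int) :
    ∀ (bb : List (Int × Int)) (acc : PySem.Dict Int Int),
      bb.foldl (fun depths p =>
        let init := PySem.Dict.ofList [(p.1, 1 - p.2)]
        let found := pvFindDepth clauses all_vars init 0 (max_depth + 1)
        depths.insert p.1 (found.getD (max_depth + 1))) acc
      = bb.foldl (fun depths p =>
        let d := pvRD clauses all_vars (PySem.Dict.ofList [(p.1, 1 - p.2)]) max_depth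
        depths.insert p.1 (match d with
          | some k => if k ≤ max_depth then k else max_depth + 1
          | none => max_depth + 1)) acc := by
  intro bb
  induction bb with
  | nil => intro acc; rfl
  | cons p ps ih =>
    intro acc
    simp only [List.foldl_cons]
    rw [pv_per_var clauses all_vars (PySem.Dict.ofList [(p.1, 1 - p.2)]) max_depth]
    exact ih _

-- ===== VERDICT (by name: the statement is the Claim_ definition above) =====
theorem measure_refutation_depth_spec : Claim_equal_measure_refutation_depth := by
  unfold Claim_equal_measure_refutation_depth
  intro clauses backbone all_vars max_depth _
  unfold Spec_measure_refutation_depth measure_refutation_depth measure_refutation_depth_alt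
  rw [pv_fold_eq]
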